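-- pv_equiv track=rewrite | github.com/abdoezz1/Online_Market_Place | core/http/http_parser.py | _extract_directive
-- ===== SOURCE A (Python) =====
-- from typing import Dict, Any, Tuple, Optional
--
-- def _extract_directive(header_value: str, directive: str) -> Optional[str]:
--     """
--     Extract a named directive from a header value.
--
--     Used primarily for parsing ``Content-Disposition`` directives such as
--     ``name`` and ``filename``.
--
--     Parameters
--     ----------
--     header_value : str
--         e.g. ``'form-data; name="image"; filename="photo.jpg"'``
--     directive : str
--         e.g. ``"name"`` or ``"filename"``
--
--     Returns
--     -------
--     str or None
--         The unquoted directive value, or ``None`` if not found.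
--
--     Examples
--     --------
--     >>> _extract_directive('form-data; name="image"; filename="photo.jpg"', "name")
--     'image'
--     >>> _extract_directive('form-data; name="image"', "filename") is None
--     True
--     """
--     search = f"{directive}="
--     for segment in header_value.split(";"):
--         segment = segment.strip()
--         if segment.lower().startswith(search.lower()):
--             value = segment.split("=", 1)[1].strip()
--             # Remove surrounding quotes.
--             if value.startswith('"') and value.endswith('"'):
--                 value = value[1:-1]
--             return value
--     return None
-- ===== SOURCE B (Python) =====
-- from typing import Optional
--
-- def _extract_directive(header_value: str, directive: str) -> Optional[str]:
--     """Recursive partition-based scan: split off one ';'-segment at a time,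
--     split the segment at its first '=', and compare the key part for
--     case-insensitive equality with the directive name."""
--     segment, found, rest = header_value.partition(";")
--     head, eq, tail = segment.strip().partition("=")
--     if eq and head.lower() == directive.lower():
--         value = tail.strip()
--         if value.startswith('"') and value.endswith('"'):
--             value = value[1:-1]
--         return value
--     if found:
--         return _extract_directive(rest, directive)
--     return None
-- ===== Notes on version B (the rewrite author's own statement) =====
-- stated objective: alternative
-- what changed: A splits the whole header on ';' and scans the segment list with a case-insensitive startswith prefix test plus a second split('=',1); B is a recursive partition scan that peels one ';'-segment at a time, splits it once at its first '=' and compares the key part for case-insensitive equality.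
-- outside the precondition, e.g. on _extract_directive('a=b=c', 'a=b'): A returns 'b=c', B returns None
import Mathlib
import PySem

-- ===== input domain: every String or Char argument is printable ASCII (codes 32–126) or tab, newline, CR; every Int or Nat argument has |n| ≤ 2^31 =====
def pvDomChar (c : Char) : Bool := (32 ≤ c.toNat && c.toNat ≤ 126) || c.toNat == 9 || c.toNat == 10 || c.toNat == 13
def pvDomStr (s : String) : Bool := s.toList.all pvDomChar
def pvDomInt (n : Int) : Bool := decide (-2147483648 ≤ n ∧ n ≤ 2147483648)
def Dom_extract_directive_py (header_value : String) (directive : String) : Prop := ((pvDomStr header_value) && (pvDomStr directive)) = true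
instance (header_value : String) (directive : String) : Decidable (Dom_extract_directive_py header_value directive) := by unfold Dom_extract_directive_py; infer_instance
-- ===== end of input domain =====

-- B replaces A's split-the-whole-header-then-scan loop by a recursive partition scan
-- (peel one ';'-segment at a time, split it at its first '=', compare the key by
-- case-insensitive equality); objective: alternative structure, same cost.

-- ===== PORT A =====
-- surrounding-quote removal (A's last three lines before 'return value')
def pvAQuote (value : List Char) : List Char :=
  if PySem.Chars.startswith value ['"'] && PySem.Chars.endswith value ['"'] then
    PySem.List.slice value (some 1) (some (-1))
  else value

-- the 'for segment in header_value.split(";")' loop with its early return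
def pvALoop (search : List Char) : List (List Char) → Option (List Char)
  | [] => none
  | seg :: rest =>
    let seg' := PySem.Chars.strip seg
    if PySem.Chars.startswith (PySem.Chars.lower seg') (PySem.Chars.lower search) then
      -- segment.split("=", 1)[1]; the guard guarantees '=' ∈ seg', so Python's [1] cannot raise
      match PySem.List.pyGet? (PySem.Chars.splitOnMax seg' ['='] 1) 1 with
      | some v => some (pvAQuote (PySem.Chars.strip v))
      | none => none
    else pvALoop search rest

def extract_directive_py (header_value : String) (directive : String) : Option String :=
  (pvALoop (directive.toList ++ ['=']) (PySem.Chars.splitOn header_value.toList [';'])).map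
    (fun cs => String.ofList cs)

-- ===== PORT B =====
-- str.partition(sep) for a one-character separator, ported by hand (exact:
-- (part before first sep, whether sep occurs, part after first sep))
def pvPartition (s : List Char) (c : Char) : List Char × Bool × List Char :=
  (s.takeWhile (fun x => x != c), s.contains c, (s.dropWhile (fun x => x != c)).drop 1)

-- surrounding-quote removal (B's identical quote rule)
def pvBQuote (value : List Char) : List Char :=
  if PySem.Chars.startswith value ['"'] && PySem.Chars.endswith value ['"'] then
    PySem.List.slice value (some 1) (some (-1))
  else value

def pvBGo (dir : List Char) (hv : List Char) : Option (List Char) :=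
  match hp : pvPartition hv ';' with
  | (segment, found, rest) =>
    let q := pvPartition (PySem.Chars.strip segment) '='
    if q.2.1 && (PySem.Chars.lower q.1 == PySem.Chars.lower dir) then
      some (pvBQuote (PySem.Chars.strip q.2.2))
    else if h : found then pvBGo dir rest else none
termination_by hv.length
decreasing_by
  simp only [pvPartition, Prod.mk.injEq] at hp
  obtain ⟨hseg, hfound, hrest⟩ := hp
  subst hrest
  have hmem : ';' ∈ hv := by rw [← hfound] at h; simpa using h
  have h1 : hv.dropWhile (fun x => x != ';') ≠ [] := by
    intro hnil
    have hall := List.dropWhile_eq_nil_iff.mp hnil ';' hmem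
    simp at hall
  have h2 := List.length_dropWhile_le (p := fun x => x != ';') (l := hv)
  cases hd : hv.dropWhile (fun x => x != ';') with
  | nil => exact absurd hd h1
  | cons a t =>
    rw [hd] at h2
    simp at h2 ⊢
    omega

def extract_directive_py_alt (header_value : String) (directive : String) : Option String :=
  (pvBGo directive.toList header_value.toList).map (fun cs => String.ofList cs)

-- ===== PRECONDITION & SPEC =====
-- Pre_ excludes directives containing '=', an input no real directive name has: there A's
-- prefix test can match a compound segment (directive 'a=b' matching segment 'a=b=c') that
-- B's split-at-first-'=' key comparison rejects — an accidental corner either answer fits.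
def Pre_extract_directive_py (header_value : String) (directive : String) : Prop :=
  '=' ∉ directive.toList
instance (header_value : String) (directive : String) : Decidable (Pre_extract_directive_py header_value directive) := by unfold Pre_extract_directive_py; infer_instance

def pvWitness_extract_directive_py : String × String :=
  ("form-data; name=\"image\"; filename=\"photo.jpg\"", "name")

def Spec_extract_directive_py (header_value : String) (directive : String) (out : Option String) : Prop := out = extract_directive_py_alt header_value directive
instance (header_value : String) (directive : String) (out : Option String) : Decidable (Spec_extract_directive_py header_value directive out) := by unfold Spec_extract_directive_py; infer_instance

-- ===== CLAIM (what is proved, stated in full; the proofs are below) =====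
def Claim_equal_extract_directive_py : Prop := ∀ (header_value : String) (directive : String), Dom_extract_directive_py header_value directive → Pre_extract_directive_py header_value directive → Spec_extract_directive_py header_value directive (extract_directive_py header_value directive)

-- ===== LEMMAS AND PROOFS =====

-- proof-side model of repeatedly partitioning at ';' (the segment list A's split produces)
def pvSplitChar (c : Char) (l : List Char) : List (List Char) :=
  if h : l.contains c then
    l.takeWhile (fun x => x != c) :: pvSplitChar c ((l.dropWhile (fun x => x != c)).drop 1)
  else [l]
termination_by l.length
decreasing_by
  have hmem : c ∈ l := by simpa using h
  have h1 : l.dropWhile (fun x => x != c) ≠ [] := by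
    intro hnil
    have hall := List.dropWhile_eq_nil_iff.mp hnil c hmem
    simp at hall
  have h2 := List.length_dropWhile_le (p := fun x => x != c) (l := l)
  cases hd : l.dropWhile (fun x => x != c) with
  | nil => exact absurd hd h1
  | cons a t =>
    rw [hd] at h2
    simp at h2 ⊢
    omega

lemma pvSplitChar_ne_nil (c : Char) (l : List Char) : pvSplitChar c l ≠ [] := by
  rw [pvSplitChar]; split <;> simp

lemma pvSplitChar_cons_self (c : Char) (rest : List Char) :
    pvSplitChar c (c :: rest) = [] :: pvSplitChar c rest := by
  rw [pvSplitChar]; simp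

lemma pvSplitChar_cons_ne (c x : Char) (rest : List Char) (hx : x ≠ c) :
    pvSplitChar c (x :: rest) = (pvSplitChar c rest).modifyHead (x :: ·) := by
  conv_lhs => rw [pvSplitChar]
  conv_rhs => rw [pvSplitChar]
  by_cases h : rest.contains c
  · have hm : c ∈ rest := by simpa using h
    simp [hm, Ne.symm hx]
    exact ⟨List.takeWhile_cons_of_pos (by simpa using hx),
      by rw [List.dropWhile_cons_of_pos (by simpa using hx)]⟩
  · have hm : c ∉ rest := by simpa using h
    simp [hm, Ne.symm hx]

-- splitOn.go computes pvSplitChar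
lemma pvSplitOn_go (c : Char) : ∀ (fuel : Nat) (l cur : List Char) (acc : List (List Char)),
    l.length ≤ fuel →
    PySem.Chars.splitOn.go [c] fuel l cur acc
      = acc.reverse ++ (pvSplitChar c l).modifyHead (cur.reverse ++ ·) := by
  intro fuel
  induction fuel with
  | zero =>
    intro l cur acc hl
    have : l = [] := by cases l <;> simp_all
    subst this
    simp [PySem.Chars.splitOn.go, pvSplitChar]
  | succ n ih =>
    intro l cur acc hl
    cases l with
    | nil => simp [PySem.Chars.splitOn.go, pvSplitChar]
    | cons x rest =>
      by_cases hx : x = c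
      · subst hx
        rw [PySem.Chars.splitOn.go]
        rw [if_pos (by simp [List.isPrefixOf])]
        simp only [List.length_cons] at hl
        rw [show List.drop [x].length (x :: rest) = rest from by simp]
        rw [ih rest [] (cur.reverse :: acc) (by omega)]
        rw [pvSplitChar_cons_self]
        obtain ⟨h0, t0, ht⟩ := List.exists_cons_of_ne_nil (pvSplitChar_ne_nil x rest)
        simp [ht]
      · rw [PySem.Chars.splitOn.go]
        rw [if_neg (by simp [List.isPrefixOf]; exact fun h => absurd h.symm hx)]
        simp only [List.length_cons] at hl
        rw [ih rest (x :: cur) acc (by omega)]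
        rw [pvSplitChar_cons_ne c x rest hx]
        obtain ⟨h0, t0, ht⟩ := List.exists_cons_of_ne_nil (pvSplitChar_ne_nil c rest)
        simp [ht]

lemma pvSplitOn_eq (c : Char) (l : List Char) :
    PySem.Chars.splitOn l [c] = pvSplitChar c l := by
  rw [PySem.Chars.splitOn, pvSplitOn_go c (l.length + 1) l [] [] (by omega)]
  obtain ⟨h0, t0, ht⟩ := List.exists_cons_of_ne_nil (pvSplitChar_ne_nil c l)
  simp [ht]

-- splitOnMax.go with maxsplit 0 returns the rest as one piece
lemma pvMaxGo_zero (c : Char) (fuel : Nat) (l cur : List Char) (acc : List (List Char)) :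
    PySem.Chars.splitOnMax.go [c] fuel 0 l cur acc = ((cur.reverse ++ l) :: acc).reverse := by
  cases fuel with
  | zero => rw [PySem.Chars.splitOnMax.go]
  | succ n =>
    cases l with
    | nil => rw [PySem.Chars.splitOnMax.go]; simp; omega
    | cons x rest => rw [PySem.Chars.splitOnMax.go]; rw [if_pos rfl]

lemma pvMaxGo_one (c : Char) : ∀ (fuel : Nat) (l cur : List Char) (acc : List (List Char)),
    l.length ≤ fuel →
    PySem.Chars.splitOnMax.go [c] fuel 1 l cur acc
      = acc.reverse ++
          (if l.contains c then
            [cur.reverse ++ l.takeWhile (fun x => x != c), (l.dropWhile (fun x => x != c)).drop 1]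
          else [cur.reverse ++ l]) := by
  intro fuel
  induction fuel with
  | zero =>
    intro l cur acc hl
    have : l = [] := by cases l <;> simp_all
    subst this
    rw [PySem.Chars.splitOnMax.go]; simp
  | succ n ih =>
    intro l cur acc hl
    cases l with
    | nil => rw [PySem.Chars.splitOnMax.go]; simp; omega
    | cons x rest =>
      by_cases hx : x = c
      · subst hx
        rw [PySem.Chars.splitOnMax.go]
        rw [if_neg (by omega), if_pos (by simp [List.isPrefixOf])]
        rw [show List.drop [x].length (x :: rest) = rest from by simp]
        rw [show (1 : Nat) - 1 = 0 from rfl, pvMaxGo_zero]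
        simp
      · rw [PySem.Chars.splitOnMax.go]
        rw [if_neg (by omega), if_neg (by simp [List.isPrefixOf]; exact fun h => absurd h.symm hx)]
        simp only [List.length_cons] at hl
        rw [ih rest (x :: cur) acc (by omega)]
        have hb : (x == c) = false := by simpa using hx
        simp only [List.contains_eq_mem, decide_eq_true_eq] at *
        by_cases hc : c ∈ rest
        · simp [hc, Ne.symm hx, List.takeWhile_cons_of_pos (p := fun x => x != c) (l := rest) (by simpa using hx),
            List.dropWhile_cons_of_pos (p := fun x => x != c) (l := rest) (by simpa using hx)]
        · simp [hc, Ne.symm hx, List.takeWhile_cons_of_pos (p := fun x => x != c) (l := rest) (by simpa using hx)]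

-- splitOnMax …(maxsplit=1) splits exactly once, at the first occurrence
lemma pvSplitOnMax_one (c : Char) (l : List Char) (h : l.contains c) :
    PySem.Chars.splitOnMax l [c] 1
      = [l.takeWhile (fun x => x != c), (l.dropWhile (fun x => x != c)).drop 1] := by
  rw [PySem.Chars.splitOnMax]
  rw [if_neg (by omega)]
  rw [show ((1 : Int)).toNat = 1 from rfl]
  rw [pvMaxGo_one c (l.length + 1) l [] [] (by omega)]
  have hm : c ∈ l := by simpa using h
  simp [hm]

lemma pvToNat_ofNat (n : Nat) (h : n < 55296) : (Char.ofNat n).toNat = n := by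
  simp [Char.ofNat, Nat.isValidChar, h]

-- lowercasing maps only letters; it hits '=' only from '='
lemma pvLowerChar_eq_iff (c : Char) : PySem.Chars.lowerChar c = '=' ↔ c = '=' := by
  unfold PySem.Chars.lowerChar
  split
  next hu =>
    simp only [PySem.Chars.isupper, Bool.and_eq_true, decide_eq_true_eq] at hu
    obtain ⟨h1, h2⟩ := hu
    rw [Char.le_def] at h1 h2
    have hA : 65 ≤ c.toNat := by exact_mod_cast h1
    have hZ : c.toNat ≤ 90 := by exact_mod_cast h2
    constructor
    · intro he
      have h61 : (Char.ofNat (c.toNat + 32)).toNat = 61 := by rw [he]; rfl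
      rw [pvToNat_ofNat _ (by omega)] at h61
      omega
    · intro he
      subst he
      exact absurd hA (by decide)
  next => exact Iff.rfl

lemma pvLower_contains (s : List Char) : ('=' ∈ PySem.Chars.lower s) ↔ '=' ∈ s := by
  simp only [PySem.Chars.lower, List.mem_map]
  constructor
  · rintro ⟨a, ha, he⟩
    rw [(pvLowerChar_eq_iff a).mp he] at ha
    exact ha
  · intro h
    exact ⟨'=', h, rfl⟩

lemma pvLower_takeWhile (s : List Char) :
    (PySem.Chars.lower s).takeWhile (fun x => x != '=')
      = PySem.Chars.lower (s.takeWhile (fun x => x != '=')) := by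
  simp only [PySem.Chars.lower, List.takeWhile_map]
  have hfun : ((fun x => x != '=') ∘ PySem.Chars.lowerChar) = (fun x : Char => x != '=') := by
    funext x
    rw [Function.comp_apply, Bool.eq_iff_iff]
    simp [pvLowerChar_eq_iff]
  rw [hfun]

-- the key characterisation: '<e>=' is a prefix of t iff t's part before its first '=' is e
lemma pvPrefix_key (e t : List Char) (hc : '=' ∉ e) :
    (e ++ ['=']) <+: t ↔ '=' ∈ t ∧ t.takeWhile (fun x => x != '=') = e := by
  constructor
  · rintro ⟨r, hr⟩
    have ht : t = e ++ '=' :: r := by rw [← hr]; simp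
    subst ht
    refine ⟨by simp, ?_⟩
    rw [List.takeWhile_append]
    have he : e.takeWhile (fun x => x != '=') = e := by
      rw [List.takeWhile_eq_self_iff]
      intro x hx
      simp
      exact fun h => hc (h ▸ hx)
    rw [he]
    simp
  · rintro ⟨hmem, htw⟩
    have hsplit := List.takeWhile_append_dropWhile (p := fun x => x != '=') (l := t)
    have hne : t.dropWhile (fun x => x != '=') ≠ [] := by
      intro hnil
      have := List.dropWhile_eq_nil_iff.mp hnil '=' hmem
      simp at this
    obtain ⟨a, u, hd⟩ := List.exists_cons_of_ne_nil hne
    have ha : a = '=' := by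
      have h1 := List.head_dropWhile_not (fun x => x != '=') hne
      have h2 : (t.dropWhile (fun x => x != '=')).head? = some a := by rw [hd]; rfl
      rw [List.head?_eq_some_head hne] at h2
      have h3 : (t.dropWhile (fun x => x != '=')).head hne = a := by
        exact Option.some_injective _ h2
      rw [h3] at h1
      simpa using h1
    refine ⟨u, ?_⟩
    rw [List.append_assoc]
    conv_rhs => rw [← hsplit]
    rw [htw, hd, ha]
    rfl

-- the guard equivalence: A's case-insensitive prefix test equals B's key equality
lemma pvGuard_eq (s d : List Char) (hd : '=' ∉ d) :
    PySem.Chars.startswith (PySem.Chars.lower s) (PySem.Chars.lower (d ++ ['=']))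
      = (s.contains '=' && (PySem.Chars.lower (s.takeWhile (fun x => x != '=')) == PySem.Chars.lower d)) := by
  rw [Bool.eq_iff_iff, PySem.Chars.startswith_iff]
  have hld : PySem.Chars.lower (d ++ ['=']) = PySem.Chars.lower d ++ ['='] := by
    simp [PySem.Chars.lower]
    rfl
  have hcd : '=' ∉ PySem.Chars.lower d := fun h => hd ((pvLower_contains d).mp h)
  rw [hld, pvPrefix_key _ _ hcd]
  simp only [Bool.and_eq_true, beq_iff_eq, List.contains_eq_mem, decide_eq_true_eq]
  rw [pvLower_contains, pvLower_takeWhile]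

lemma pvQuote_eq : pvAQuote = pvBQuote := rfl

lemma pvMain (dtl : List Char) (hd : '=' ∉ dtl) : ∀ hv : List Char,
    pvALoop (dtl ++ ['=']) (pvSplitChar ';' hv) = pvBGo dtl hv := by
  have key : ∀ (n : Nat) (hv : List Char), hv.length ≤ n →
      pvALoop (dtl ++ ['=']) (pvSplitChar ';' hv) = pvBGo dtl hv := by
    intro n
    induction n using Nat.strong_induction_on with
    | _ n ih =>
      intro hv hn
      rw [pvBGo, pvSplitChar]
      by_cases h : hv.contains ';'
      · rw [dif_pos h]
        rw [pvALoop]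
        simp only [pvPartition, h]
        rw [pvGuard_eq _ _ hd]
        by_cases hg : ((PySem.Chars.strip (hv.takeWhile (fun x => x != ';'))).contains '='
            && (PySem.Chars.lower ((PySem.Chars.strip (hv.takeWhile (fun x => x != ';'))).takeWhile (fun x => x != '='))
                == PySem.Chars.lower dtl))
        · rw [if_pos hg, if_pos hg]
          have hc : (PySem.Chars.strip (hv.takeWhile (fun x => x != ';'))).contains '=' := by
            exact (Bool.and_eq_true _ _ |>.mp hg).1
          rw [pvSplitOnMax_one _ _ hc]
          simp [PySem.List.pyGet?, PySem.List.pyIdx?, pvQuote_eq]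
        · rw [if_neg hg, if_neg hg]
          have hne : hv.dropWhile (fun x => x != ';') ≠ [] := by
            intro hnil
            have hm : ';' ∈ hv := by simpa using h
            have := List.dropWhile_eq_nil_iff.mp hnil ';' hm
            simp at this
          have hlen : ((hv.dropWhile (fun x => x != ';')).drop 1).length < hv.length := by
            have h2 := List.length_dropWhile_le (p := fun x => x != ';') (l := hv)
            cases hdw : hv.dropWhile (fun x => x != ';') with
            | nil => exact absurd hdw hne
            | cons a u =>
              rw [hdw] at h2
              simp at h2 ⊢
              omega
          rw [dif_pos trivial]
          exact ih ((hv.dropWhile (fun x => x != ';')).drop 1).length (by omega) _ le_rfl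
      · rw [dif_neg h]
        have htw : hv.takeWhile (fun x => x != ';') = hv := by
          rw [List.takeWhile_eq_self_iff]
          intro x hx
          simp
          intro hxe
          exact h (by simp [hxe ▸ hx])
        rw [pvALoop]
        simp only [pvPartition, h, htw]
        rw [pvGuard_eq _ _ hd]
        by_cases hg : ((PySem.Chars.strip hv).contains '='
            && (PySem.Chars.lower ((PySem.Chars.strip hv).takeWhile (fun x => x != '='))
                == PySem.Chars.lower dtl))
        · rw [if_pos hg, if_pos hg]
          have hc : (PySem.Chars.strip hv).contains '=' := (Bool.and_eq_true _ _ |>.mp hg).1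
          rw [pvSplitOnMax_one _ _ hc]
          simp [PySem.List.pyGet?, PySem.List.pyIdx?, pvQuote_eq]
        · rw [if_neg hg, if_neg hg]
          rw [dif_neg (by simp)]
          rw [pvALoop]
  exact fun hv => key hv.length hv le_rfl

-- ===== VERDICT (by name: the statement is the Claim_ definition above) =====
theorem extract_directive_py_spec : Claim_equal_extract_directive_py := by
  intro hv d _ hpre
  unfold Spec_extract_directive_py
  unfold extract_directive_py extract_directive_py_alt
  rw [pvSplitOn_eq, pvMain d.toList hpre hv.toList]
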